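-- pv_equiv track=rewrite | github.com/asaaaanmyrza/asanmyrza_spring_pp2 | Lab3_1.py | has_007
-- ===== SOURCE A (Python) =====
-- def has_007(nums):
--     statement = False
--     clone_nums=[]
--     for i in range(0,len(nums)):
--         if(nums[i]==0 or nums[i]==7):
--             clone_nums.append(nums[i])
--     for i in range(0,len(clone_nums)-2):
--         if(clone_nums[i]==0 and clone_nums[i+1]==0 and clone_nums[i+2]==7):
--             statement = True
--             break
--     return statement
-- ===== SOURCE B (Python) =====
-- def has_007(nums):
--     zeros = 0
--     for x in nums:
--         if x == 0:
--             zeros += 1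
--         elif x == 7:
--             if zeros >= 2:
--                 return True
--             zeros = 0
--     return False
-- ===== Notes on version B (the rewrite author's own statement) =====
-- stated objective: simpler
-- what changed: Replaced the build-a-filtered-clone-then-index-scan-windows approach with a single pass over nums maintaining one integer counter of consecutive zeros (among 0/7 elements), returning early on a 7 after two or more zeros.
import Mathlib
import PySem

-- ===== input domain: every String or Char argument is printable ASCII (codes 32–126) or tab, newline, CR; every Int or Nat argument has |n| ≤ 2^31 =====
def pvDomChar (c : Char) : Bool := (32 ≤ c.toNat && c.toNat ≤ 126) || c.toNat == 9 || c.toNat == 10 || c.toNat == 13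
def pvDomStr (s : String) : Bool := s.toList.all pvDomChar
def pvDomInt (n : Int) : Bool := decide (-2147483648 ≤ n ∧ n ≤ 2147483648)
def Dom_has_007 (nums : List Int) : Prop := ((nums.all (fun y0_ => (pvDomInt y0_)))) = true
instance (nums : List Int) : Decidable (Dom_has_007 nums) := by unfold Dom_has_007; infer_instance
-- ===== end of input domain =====

-- B replaces A's filtered clone list + index window scan by a single pass with one
-- integer counter of consecutive zeros (simpler, O(1) extra space).

-- ===== PORT A =====
-- second loop of A: 'for i in range(0, len(clone)-2): if clone[i]==0 and clone[i+1]==0 and clone[i+2]==7: statement=True; break'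
-- (the break makes the loop an early-return recursion over the index list; indices are always in range, so pyGetD is exact)
def has007Loop2 (clone : List Int) : List Int → Bool
  | [] => false
  | i :: rest =>
    if PySem.List.pyGetD clone i 0 = 0 ∧ PySem.List.pyGetD clone (i + 1) 0 = 0 ∧ PySem.List.pyGetD clone (i + 2) 0 = 7 then
      true
    else
      has007Loop2 clone rest

def has_007 (nums : List Int) : Bool :=
  -- statement = False; clone_nums = []; for i in range(0, len(nums)): if nums[i]==0 or nums[i]==7: clone_nums.append(nums[i])
  let clone : List Int :=
    (PySem.List.pyRange 0 (PySem.List.len nums) 1).foldl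
      (fun acc i =>
        if PySem.List.pyGetD nums i 0 = 0 ∨ PySem.List.pyGetD nums i 0 = 7 then
          acc ++ [PySem.List.pyGetD nums i 0]
        else acc) []
  has007Loop2 clone (PySem.List.pyRange 0 (PySem.List.len clone - 2) 1)

-- ===== PORT B =====
-- zeros = 0; for x in nums: if x==0: zeros+=1 elif x==7: (return True if zeros>=2 else zeros=0); return False
def has007Go (zeros : Int) : List Int → Bool
  | [] => false
  | x :: rest =>
    if x = 0 then has007Go (zeros + 1) rest
    else if x = 7 then (if zeros ≥ 2 then true else has007Go 0 rest)
    else has007Go zeros rest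

def has_007_alt (nums : List Int) : Bool := has007Go 0 nums

-- ===== PRECONDITION & SPEC =====
def Spec_has_007 (nums : List Int) (out : Bool) : Prop := out = has_007_alt nums
instance (nums : List Int) (out : Bool) : Decidable (Spec_has_007 nums out) := by unfold Spec_has_007; infer_instance

-- ===== CLAIM (what is proved, stated in full; the proofs are below) =====
def Claim_equal_has_007 : Prop := ∀ (nums : List Int), Dom_has_007 nums → Spec_has_007 nums (has_007 nums)

-- ===== LEMMAS AND PROOFS =====

-- the canonical '0,0,7 consecutive window' scan both sides are reduced to
def scan3 : List Int → Bool
  | a :: b :: c :: r => if a = 0 ∧ b = 0 ∧ c = 7 then true else scan3 (b :: c :: r)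
  | _ => false

lemma scan3_cons (a : Int) (t : List Int) :
    scan3 (a :: t) =
      ((match t with
        | b :: c :: _ => decide (a = 0 ∧ b = 0 ∧ c = 7)
        | _ => false) || scan3 t) := by
  match t with
  | [] => simp [scan3]
  | [b] => simp [scan3]
  | b :: c :: r =>
    simp only [scan3]
    by_cases h : a = 0 ∧ b = 0 ∧ c = 7 <;> simp [h]

lemma scan3_no_seven (l : List Int) (h : ∀ x ∈ l, x ≠ 7) : scan3 l = false := by
  induction l with
  | nil => rfl
  | cons a t ih =>
    rw [scan3_cons, ih (fun x hx => h x (List.mem_cons_of_mem _ hx))]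
    match t with
    | [] => rfl
    | [b] => rfl
    | b :: c :: r =>
      have hc : c ≠ 7 := h c (by simp)
      simp [hc]

lemma scan3_replicate (n : Nat) : scan3 (List.replicate n 0) = false := by
  apply scan3_no_seven
  intro x hx
  rw [List.eq_of_mem_replicate hx]
  decide

lemma scan3_zeros_seven (t : List Int) : ∀ m : Nat, scan3 (List.replicate (m + 2) 0 ++ 7 :: t) = true := by
  intro m
  induction m with
  | zero => simp [scan3]
  | succ k ih =>
    have : List.replicate (k + 3) (0 : Int) ++ 7 :: t = 0 :: (List.replicate (k + 2) 0 ++ 7 :: t) := by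
      simp [List.replicate_succ]
    rw [this, scan3_cons, ih, Bool.or_true]

lemma scan3_cons_seven (t : List Int) : scan3 (7 :: t) = scan3 t := by
  rw [scan3_cons]
  match t with
  | [] => rfl
  | [b] => rfl
  | b :: c :: r => simp

lemma scan3_zero_seven (t : List Int) : scan3 (0 :: 7 :: t) = scan3 (7 :: t) := by
  rw [scan3_cons]
  match t with
  | [] => rfl
  | c :: r => simp

-- positive index into a cons shifts down by one (also when out of range: both take the default)
lemma pyGetD_cons_pos (a : Int) (t : List Int) (j : Int) (hj : 1 ≤ j) (d : Int) :
    PySem.List.pyGetD (a :: t) j d = PySem.List.pyGetD t (j - 1) d := by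
  unfold PySem.List.pyGetD
  rw [PySem.List.pyGet?_of_nonneg (a :: t) (by omega : (0:Int) ≤ j),
      PySem.List.pyGet?_of_nonneg t (by omega : (0:Int) ≤ j - 1)]
  have h3 : j.toNat = (j - 1).toNat + 1 := by omega
  rw [h3, List.getElem?_cons_succ]

lemma loop2_shift (a : Int) (t : List Int) :
    ∀ (n : Nat) (j m : Int), 1 ≤ j → (m - j).toNat = n →
      has007Loop2 (a :: t) (PySem.List.pyRange j m 1) = has007Loop2 t (PySem.List.pyRange (j - 1) (m - 1) 1) := by
  intro n
  induction n with
  | zero =>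
    intro j m hj hn
    rw [PySem.List.pyRange_one_eq_nil (by omega), PySem.List.pyRange_one_eq_nil (by omega)]
    rfl
  | succ k ih =>
    intro j m hj hn
    have hjm : j < m := by omega
    rw [PySem.List.pyRange_one_cons hjm, PySem.List.pyRange_one_cons (by omega : j - 1 < m - 1)]
    simp only [has007Loop2]
    have hc0 : PySem.List.pyGetD (a :: t) j 0 = PySem.List.pyGetD t (j - 1) 0 :=
      pyGetD_cons_pos a t j (by omega) 0
    have hc1 : PySem.List.pyGetD (a :: t) (j + 1) 0 = PySem.List.pyGetD t (j - 1 + 1) 0 := by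
      rw [pyGetD_cons_pos a t (j + 1) (by omega) 0]
      congr 1
      ring
    have hc2 : PySem.List.pyGetD (a :: t) (j + 2) 0 = PySem.List.pyGetD t (j - 1 + 2) 0 := by
      rw [pyGetD_cons_pos a t (j + 2) (by omega) 0]
      congr 1
      ring
    have hrec : has007Loop2 (a :: t) (PySem.List.pyRange (j + 1) m 1)
        = has007Loop2 t (PySem.List.pyRange (j - 1 + 1) (m - 1) 1) := by
      rw [ih (j + 1) m (by omega) (by omega)]
      congr 2
      ring
    rw [hc0, hc1, hc2, hrec]

lemma loop2_eq_scan3 : ∀ l : List Int,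
    has007Loop2 l (PySem.List.pyRange 0 ((l.length : Int) - 2) 1) = scan3 l := by
  intro l
  induction l with
  | nil => rw [PySem.List.pyRange_one_eq_nil (by simp)]; rfl
  | cons a t ih =>
    match t, ih with
    | [], _ => rw [PySem.List.pyRange_one_eq_nil (by simp)]; rfl
    | [b], _ => rw [PySem.List.pyRange_one_eq_nil (by simp)]; rfl
    | b :: c :: r, ih =>
      have hlen : ((a :: b :: c :: r).length : Int) - 2 = (r.length : Int) + 1 := by
        simp; ring
      rw [hlen, PySem.List.pyRange_one_cons (by omega)]
      simp only [has007Loop2]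
      have g0 : PySem.List.pyGetD (a :: b :: c :: r) 0 (0 : Int) = a := by
        simp [pysem]
      have g1 : PySem.List.pyGetD (a :: b :: c :: r) (0 + 1) (0 : Int) = b := by
        norm_num
        rw [show ((1 : Int)) = ((1 : Nat) : Int) by norm_num, PySem.List.pyGetD_natCast]
        rfl
      have g2 : PySem.List.pyGetD (a :: b :: c :: r) (0 + 2) (0 : Int) = c := by
        norm_num
        rw [show ((2 : Int)) = ((2 : Nat) : Int) by norm_num, PySem.List.pyGetD_natCast]
        rfl
      rw [g0, g1, g2]
      have hshift := loop2_shift a (b :: c :: r) ((r.length : Int)).toNat (0 + 1) ((r.length : Int) + 1)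
        (by omega) (by omega)
      have hlen2 : ((b :: c :: r).length : Int) - 2 = (r.length : Int) + 1 - 1 := by simp; ring
      rw [hshift, show (0 : Int) + 1 - 1 = 0 by ring, ← hlen2, ih]
      simp only [scan3]

-- B ignores elements other than 0 and 7: it computes on the 0/7-filtered list
lemma go_skip (l : List Int) : ∀ z : Int,
    has007Go z l = has007Go z (l.filter (fun x => decide (x = 0) || decide (x = 7))) := by
  induction l with
  | nil => intro z; rfl
  | cons x t ih =>
    intro z
    by_cases h0 : x = 0
    · subst h0
      simp only [has007Go, List.filter_cons]
      norm_num [has007Go]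
      exact ih (z + 1)
    · by_cases h7 : x = 7
      · subst h7
        simp only [has007Go, List.filter_cons]
        norm_num [has007Go]
        by_cases hz : z ≥ 2
        · simp [hz]
        · simp [hz]
          exact ih 0
      · simp only [has007Go, List.filter_cons, if_neg h0, if_neg h7]
        have hd : (decide (x = 0) || decide (x = 7)) = false := by simp [h0, h7]
        rw [hd]
        simp only [Bool.false_eq_true, if_false]
        exact ih z

-- over a 0/7-only list, B's counter recursion is the 0,0,7 window scan with the
-- pending zeros prepended
lemma go_eq_scan3 (l : List Int) (hl : ∀ x ∈ l, x = 0 ∨ x = 7) :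
    ∀ z : Nat, has007Go (z : Int) l = scan3 (List.replicate z 0 ++ l) := by
  induction l with
  | nil =>
    intro z
    simp only [has007Go, List.append_nil]
    exact (scan3_replicate z).symm
  | cons x t ih =>
    intro z
    have hx := hl x (by simp)
    have ht : ∀ y ∈ t, y = 0 ∨ y = 7 := fun y hy => hl y (List.mem_cons_of_mem _ hy)
    rcases hx with h0 | h7
    · subst h0
      simp only [has007Go]
      have : (z : Int) + 1 = ((z + 1 : Nat) : Int) := by push_cast; ring
      rw [this, ih ht (z + 1)]
      rw [List.replicate_succ']
      simp
    · subst h7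
      simp only [has007Go, if_neg (by decide : ¬ (7:Int) = 0)]
      rw [if_pos trivial]
      by_cases hz : 2 ≤ z
      · obtain ⟨m, hm⟩ : ∃ m, z = m + 2 := ⟨z - 2, by omega⟩
        have h2z : (z : Int) ≥ 2 := by exact_mod_cast hz
        rw [if_pos h2z, hm, scan3_zeros_seven t m]
      · have h2z : ¬ ((z : Int) ≥ 2) := by
          simp only [ge_iff_le]
          exact_mod_cast hz
        rw [if_neg h2z]
        have h0 := ih ht 0
        simp only [Nat.cast_zero, List.replicate_zero, List.nil_append] at h0
        rw [h0]
        interval_cases z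
        · simp [scan3_cons_seven]
        · simp [List.replicate_succ, scan3_zero_seven, scan3_cons_seven]

-- ===== VERDICT (by name: the statement is the Claim_ definition above) =====
theorem has_007_spec : Claim_equal_has_007 := by
  intro nums _
  unfold Spec_has_007 has_007 has_007_alt
  simp only [PySem.List.len_eq]
  rw [PySem.List.foldl_pyRange_zero_pyGetD' nums 0
      (fun acc v => if v = 0 ∨ v = 7 then acc ++ [v] else acc) [],
      PySem.List.foldl_append_ite_eq_filter]
  simp only [List.nil_append]
  simp only [Bool.decide_or]
  rw [loop2_eq_scan3, go_skip nums 0]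
  have h := go_eq_scan3 (nums.filter (fun x => decide (x = 0) || decide (x = 7)))
    (fun x hx => by simpa using (List.mem_filter.mp hx).2) 0
  simp only [Nat.cast_zero, List.replicate_zero, List.nil_append] at h
  rw [h]
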